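-- pv_equiv track=rewrite | github.com/SEICS/dice | jw/dice_query_gr.py | findSingleNodePath
-- ===== SOURCE A (Python) =====
-- def findSingleNodePath(allPath):
--     # find the path to each node starting from root,
--     # where dictionary key is the node, and its value
--     # is the path to it(previous visited node for this path)
--     nodesPath = {}
--     paths = [path[:i] for path in allPath for i in range(1, len(path)+1)]
--
--     for path in paths:
--         node = path[-1]
--         if node not in nodesPath.keys():
--             if len(path) == 1:
--                 nodesPath[node] = []
--             else:
--                 nodesPath[node] = path[:-1]
--         else:
--             continue
--     return nodesPath
-- ===== SOURCE B (Python) =====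
-- def findSingleNodePath(allPath):
--     # One pass with a separate seen-set, a growing prefix accumulator and a flat pair list:
--     # no prefix materialisation and no slicing; the dict is assembled once at the end.
--     seen = set()
--     pairs = []
--     for path in allPath:
--         prefix = []
--         for node in path:
--             if node not in seen:
--                 seen.add(node)
--                 pairs.append((node, prefix.copy()))
--             prefix.append(node)
--     return dict(pairs)
-- ===== Notes on version B (the rewrite author's own statement) =====
-- stated objective: faster
-- what changed: A materialises every prefix path[:i] of every path into one flat list and then folds it into a dict with last-element extraction and a second slice; B never slices: it walks each path once keeping a growing prefix accumulator (O(1) append), records (node, copy-of-prefix) in a flat pair list only on first sight of a node using a separate seen-set, and builds the dict once from the pairs at the end.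
import Mathlib
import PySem

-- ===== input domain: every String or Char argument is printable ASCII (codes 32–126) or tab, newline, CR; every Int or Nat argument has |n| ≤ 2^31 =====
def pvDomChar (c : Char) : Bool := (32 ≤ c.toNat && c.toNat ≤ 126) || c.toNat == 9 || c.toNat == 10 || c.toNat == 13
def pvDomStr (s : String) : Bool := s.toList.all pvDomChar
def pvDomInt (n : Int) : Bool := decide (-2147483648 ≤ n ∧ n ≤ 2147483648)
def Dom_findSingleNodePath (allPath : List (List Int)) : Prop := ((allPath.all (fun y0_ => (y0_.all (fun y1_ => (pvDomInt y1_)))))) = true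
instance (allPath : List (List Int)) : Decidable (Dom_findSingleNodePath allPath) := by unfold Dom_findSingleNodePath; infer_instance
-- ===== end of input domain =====

-- B replaces A's "materialise every prefix of every path, then key each by its last element with a
-- second slice" by one walk per path with a growing prefix accumulator, a separate seen-set and a
-- flat pair list turned into a dict once at the end (measured faster on the generated inputs).

-- ===== PORT A =====
-- A: builds the list of ALL prefixes path[:i] of every path, then for each prefix keys its last
-- element to the prefix minus that element (first occurrence wins).
def findSingleNodePath (allPath : List (List Int)) : List (Int × List Int) :=
  let paths : List (List Int) :=
    allPath.flatMap (fun path =>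
      (PySem.List.pyRange 1 ((path.length : Int) + 1) 1).map
        (fun i => PySem.List.slice path none (some i)))
  let nodesPath : PySem.Dict Int (List Int) :=
    paths.foldl (fun d path =>
      match PySem.List.pyGet? path (-1) with  -- path[-1]; every prefix is nonempty, so never none
      | none => d
      | some node =>
        if d.contains node then d  -- 'node not in nodesPath.keys()' negated: 'continue'
        else if path.length = 1 then d.insert node []
        else d.insert node (PySem.List.slice path none (some (-1))))
      PySem.Dict.empty
  nodesPath.items

-- ===== PORT B =====
-- B: seen-set + pair list + growing prefix; dict built once from the pairs.
def findSingleNodePath_alt (allPath : List (List Int)) : List (Int × List Int) :=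
  let st : PySem.Set Int × List (Int × List Int) :=
    allPath.foldl (fun st path =>
      (path.foldl (fun (q : (PySem.Set Int × List (Int × List Int)) × List Int) node =>
          if PySem.Set.contains q.1.1 node then (q.1, q.2 ++ [node])
          else ((PySem.Set.add q.1.1 node, q.1.2 ++ [(node, q.2)]), q.2 ++ [node]))
        (st, ([] : List Int))).1)
      (PySem.Set.empty, [])
  (PySem.Dict.ofList st.2).items

-- ===== PRECONDITION & SPEC =====
def Spec_findSingleNodePath (allPath : List (List Int)) (out : List (Int × List Int)) : Prop := out = findSingleNodePath_alt allPath
instance (allPath : List (List Int)) (out : List (Int × List Int)) : Decidable (Spec_findSingleNodePath allPath out) := by unfold Spec_findSingleNodePath; infer_instance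

-- ===== CLAIM =====
def Claim_equal_findSingleNodePath : Prop := ∀ (allPath : List (List Int)), Dom_findSingleNodePath allPath → Spec_findSingleNodePath allPath (findSingleNodePath allPath)

-- ===== LEMMAS AND PROOFS =====

-- the per-index step A's inner loop reduces to
def pvCore (path : List Int) (d : PySem.Dict Int (List Int)) (k : Nat) : PySem.Dict Int (List Int) :=
  if d.contains (path.getD k 0) then d else d.insert (path.getD k 0) (path.take k)

-- the common shape of both inner loops: walk the rest of a path with the prefix built so far
def pvWalk (pfx : List Int) : List Int → PySem.Dict Int (List Int) → PySem.Dict Int (List Int)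
  | [], d => d
  | x :: xs, d => pvWalk (pfx ++ [x]) xs (if d.contains x then d else d.insert x pfx)

theorem pvGetLast_take (l : List Int) (k : Nat) (h : k < l.length) :
    PySem.List.pyGet? (l.take (k+1)) (-1) = some (l.getD k 0) := by
  simp [PySem.List.pyGet?, PySem.List.pyIdx?]
  rw [if_pos (by omega)]
  simp [Nat.min_eq_left (by omega : k+1 ≤ l.length), List.getElem?_take]
  simp [List.getElem?_eq_getElem h]

theorem pvDropLast_take (l : List Int) (k : Nat) (h : k < l.length) :
    (l.take (k+1)).dropLast = l.take k := by
  rw [List.dropLast_eq_take]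
  simp [List.take_take, Nat.min_eq_left (by omega : k+1 ≤ l.length)]

-- A's inner loop over the prefixes of one path is the core fold over its indices
theorem pvInnerA (path : List Int) (d : PySem.Dict Int (List Int)) :
    ((PySem.List.pyRange 1 ((path.length : Int) + 1) 1).map
        (fun i => PySem.List.slice path none (some i))).foldl
      (fun d pfx =>
        match PySem.List.pyGet? pfx (-1) with
        | none => d
        | some node =>
          if d.contains node then d
          else if pfx.length = 1 then d.insert node []
          else d.insert node (PySem.List.slice pfx none (some (-1)))) d
      = (List.range path.length).foldl (pvCore path) d := by
  rw [PySem.List.pyRange_one]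
  have : ((path.length : Int) + 1 - 1).toNat = path.length := by omega
  rw [this, List.map_map, List.foldl_map]
  apply PySem.List.foldl_congr_mem
  intro acc k hk
  rw [List.mem_range] at hk
  have hcast : (1 : Int) + (k : Int) = ((k + 1 : Nat) : Int) := by push_cast; ring
  simp only [Function.comp, hcast, PySem.List.slice_to_natCast]
  rw [pvGetLast_take path k hk]
  simp only [pvCore, List.getD_eq_getElem?_getD]
  by_cases hc : acc.contains (path[k]?.getD 0)
  · simp [hc]
  · simp only [hc, Bool.false_eq_true, if_false]
    have hlen : (path.take (k+1)).length = k + 1 := by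
      simp [Nat.min_eq_left (by omega : k+1 ≤ path.length)]
    by_cases hk0 : k = 0
    · subst hk0; simp [hlen]
    · rw [if_neg (by omega), PySem.List.slice_to_neg_one, pvDropLast_take path k hk]

-- the indexed core fold over a path is the structural walk (path split as pfx ++ l)
theorem pvRangeWalk (l : List Int) : ∀ (pfx : List Int) (d : PySem.Dict Int (List Int)),
    (List.range' pfx.length l.length).foldl (pvCore (pfx ++ l)) d = pvWalk pfx l d := by
  induction l with
  | nil => intro pfx d; simp [pvWalk]
  | cons x xs ih =>
    intro pfx d
    rw [List.length_cons, List.range'_succ, List.foldl_cons]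
    have hget : (pfx ++ x :: xs).getD pfx.length 0 = x := by
      simp [List.getD_eq_getElem?_getD]
    have htake : (pfx ++ x :: xs).take pfx.length = pfx := by
      simp
    have hstep : pvCore (pfx ++ x :: xs) d pfx.length
        = (if d.contains x then d else d.insert x pfx) := by
      simp only [pvCore, hget, htake]
    rw [hstep]
    have := ih (pfx ++ [x]) (if d.contains x then d else d.insert x pfx)
    simp only [List.length_append, List.length_cons, List.length_nil, List.append_assoc,
      List.singleton_append] at this
    rw [this]
    rfl

theorem pvCoreRange (path : List Int) (d : PySem.Dict Int (List Int)) :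
    (List.range path.length).foldl (pvCore path) d = pvWalk [] path d := by
  have := pvRangeWalk path [] d
  simpa [List.range_eq_range'] using this

-- set/dict bridges
theorem pvContains_keys (d : PySem.Dict Int (List Int)) (x : Int) :
    PySem.Set.contains d.keys x = d.contains x := by
  by_cases h : d.contains x = true
  · rw [h]
    rw [PySem.Set.contains_iff]
    exact (PySem.Dict.contains_iff_mem_keys d x).mp h
  · rw [Bool.eq_false_iff.mpr h]
    rw [← Bool.not_eq_true, PySem.Set.contains_iff]
    intro hm
    exact h ((PySem.Dict.contains_iff_mem_keys d x).mpr hm)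

-- B's inner loop from A's (keys, items) state is the same walk
theorem pvInnerB (l : List Int) : ∀ (pfx : List Int) (d : PySem.Dict Int (List Int)),
    l.foldl (fun (q : (PySem.Set Int × List (Int × List Int)) × List Int) node =>
        if PySem.Set.contains q.1.1 node then (q.1, q.2 ++ [node])
        else ((PySem.Set.add q.1.1 node, q.1.2 ++ [(node, q.2)]), q.2 ++ [node]))
      ((d.keys, d.items), pfx)
    = (((pvWalk pfx l d).keys, (pvWalk pfx l d).items), pfx ++ l) := by
  induction l with
  | nil => intro pfx d; simp [pvWalk]
  | cons x xs ih =>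
    intro pfx d
    simp only [List.foldl_cons, pvWalk]
    by_cases h : d.contains x = true
    · rw [if_pos (by rw [pvContains_keys]; exact h), if_pos h]
      simpa using ih (pfx ++ [x]) d
    · have h' : d.contains x = false := Bool.eq_false_iff.mpr h
      have hs : PySem.Set.contains d.keys x = false := by rw [pvContains_keys]; exact h'
      have hnk : x ∉ d.keys := fun hm => h ((PySem.Dict.contains_iff_mem_keys d x).mpr hm)
      simp only [hs, h', Bool.false_eq_true, if_false]
      rw [show PySem.Set.add d.keys x = (d.insert x pfx).keys by
            simp [PySem.Set.add, hnk, PySem.Dict.keys_insert_of_not_contains d pfx h'],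
          show d.items ++ [(x, pfx)] = (d.insert x pfx).items from
            (PySem.Dict.items_insert_of_not_contains d pfx h').symm]
      simpa using ih (pfx ++ [x]) (d.insert x pfx)


-- keys stay nodup through a walk
theorem pvWalk_nodup (l : List Int) : ∀ (pfx : List Int) (d : PySem.Dict Int (List Int)),
    d.keys.Nodup → (pvWalk pfx l d).keys.Nodup := by
  induction l with
  | nil => intro _ _ h; exact h
  | cons x xs ih =>
    intro pfx d h
    unfold pvWalk
    apply ih
    split
    · exact h
    · exact PySem.Dict.nodup_keys_insert d x pfx h

-- outer loops agree
theorem pvOuter (allPath : List (List Int)) (d : PySem.Dict Int (List Int)) :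
    allPath.foldl (fun st path =>
      (path.foldl (fun (q : (PySem.Set Int × List (Int × List Int)) × List Int) node =>
          if PySem.Set.contains q.1.1 node then (q.1, q.2 ++ [node])
          else ((PySem.Set.add q.1.1 node, q.1.2 ++ [(node, q.2)]), q.2 ++ [node]))
        (st, ([] : List Int))).1)
      (d.keys, d.items)
    = (((allPath.foldl (fun d path => pvWalk [] path d) d)).keys,
       ((allPath.foldl (fun d path => pvWalk [] path d) d)).items) := by
  induction allPath generalizing d with
  | nil => simp
  | cons p ps ih =>
    simp only [List.foldl_cons]
    rw [pvInnerB p [] d]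
    exact ih (pvWalk [] p d)

theorem pvOfItems (d : PySem.Dict Int (List Int)) (h : d.keys.Nodup) :
    (PySem.Dict.ofList d.items).items = d.items := by
  show ((PySem.Dict.empty : PySem.Dict Int (List Int)).update d.items).items = d.items
  unfold PySem.Dict.update
  rw [PySem.Dict.items_foldl_insert_fresh d.items Prod.fst Prod.snd PySem.Dict.empty
    (by intro a _; simp [PySem.Dict.contains_empty]) h]
  simp [PySem.Dict.empty]

theorem pvFold_nodup (allPath : List (List Int)) :
    ∀ (d : PySem.Dict Int (List Int)), d.keys.Nodup →
    (allPath.foldl (fun d path => pvWalk [] path d) d).keys.Nodup := by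
  induction allPath with
  | nil => intro d h; exact h
  | cons p ps ih => intro d h; exact ih _ (pvWalk_nodup p [] d h)

-- ===== VERDICT =====
theorem findSingleNodePath_spec : Claim_equal_findSingleNodePath := by
  intro allPath _
  unfold Spec_findSingleNodePath findSingleNodePath findSingleNodePath_alt
  simp only [List.foldl_flatMap]
  have hA : allPath.foldl (fun d path =>
      ((PySem.List.pyRange 1 ((path.length : Int) + 1) 1).map
        (fun i => PySem.List.slice path none (some i))).foldl
      (fun d pfx =>
        match PySem.List.pyGet? pfx (-1) with
        | none => d
        | some node =>
          if d.contains node then d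
          else if pfx.length = 1 then d.insert node []
          else d.insert node (PySem.List.slice pfx none (some (-1)))) d) PySem.Dict.empty
      = allPath.foldl (fun d path => pvWalk [] path d) PySem.Dict.empty := by
    apply PySem.List.foldl_congr_mem
    intro acc path _
    rw [pvInnerA, pvCoreRange]
  rw [hA]
  have hinit : ((PySem.Set.empty : PySem.Set Int), ([] : List (Int × List Int)))
      = ((PySem.Dict.empty : PySem.Dict Int (List Int)).keys,
         (PySem.Dict.empty : PySem.Dict Int (List Int)).items) := by
    simp [PySem.Set.empty, PySem.Dict.empty]
  rw [hinit, pvOuter]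
  exact (pvOfItems _ (pvFold_nodup allPath PySem.Dict.empty PySem.Dict.nodup_keys_empty)).symm
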